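-- pv_equiv track=rewrite | github.com/cynic-8122/DSA-in-Python | srtprb2.py | requiredmatches
-- ===== SOURCE A (Python) =====
-- def requiredmatches(arr):
--     if len(arr) == 2:
--
--         if arr[0] != arr[1]:
--             return 1
--         else:
--             return 0
--
--     half = len(arr)//2
--
--     left_required_matches = requiredmatches(arr[:half])
--     right_required_matches = requiredmatches(arr[half:])
--
--     matches1 = set(arr[:half])
--     matches2 = set(arr[half:])
--
--     if (matches1 & matches2):
--         return left_required_matches+right_required_matches
--     else:
--         return left_required_matches+right_required_matches + 1
-- ===== SOURCE B (Python) =====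
-- def requiredmatches(arr):
--     # Iterative bottom-up: start from singleton value-sets and merge adjacent
--     # pairs level by level, counting a match whenever the two merged sets are disjoint.
--     count = 0
--     sets = [{x} for x in arr]
--     while len(sets) > 1:
--         merged = []
--         for i in range(0, len(sets), 2):
--             a, b = sets[i], sets[i + 1]
--             if not (a & b):
--                 count += 1
--             merged.append(a | b)
--         sets = merged
--     return count
-- ===== Notes on version B (the rewrite author's own statement) =====
-- stated objective: alternative
-- what changed: B replaces A's top-down recursion with slicing and per-node set rebuilds by an iterative bottom-up loop: it starts from singleton value-sets and merges adjacent pairs level by level, counting a merge whose two sets are disjoint.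
import Mathlib
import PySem

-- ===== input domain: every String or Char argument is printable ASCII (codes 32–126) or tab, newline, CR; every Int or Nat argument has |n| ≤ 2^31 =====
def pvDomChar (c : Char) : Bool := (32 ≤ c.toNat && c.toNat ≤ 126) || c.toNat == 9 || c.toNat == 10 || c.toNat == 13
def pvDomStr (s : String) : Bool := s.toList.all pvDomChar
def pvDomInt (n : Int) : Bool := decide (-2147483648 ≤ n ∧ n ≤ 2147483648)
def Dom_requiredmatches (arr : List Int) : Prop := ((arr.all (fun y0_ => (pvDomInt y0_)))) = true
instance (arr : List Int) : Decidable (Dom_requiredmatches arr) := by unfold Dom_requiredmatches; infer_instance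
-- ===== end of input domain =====

-- B replaces A's top-down recursion (slicing and rebuilding each half's set at every node)
-- by an iterative bottom-up loop over levels of merged value-sets (alternative decomposition, same cost).


-- ===== PORT A =====
-- fuel = recursion depth bound (arr.length suffices on Pre_); fuel 0 is unreachable under Pre_
def requiredmatchesFuel : Nat → List Int → Int
  | 0, _ => 0
  | fuel+1, arr =>
    if arr.length = 2 then
      if PySem.List.pyGetD arr 0 0 ≠ PySem.List.pyGetD arr 1 0 then 1 else 0
    else
      let half : Int := PySem.Int.floordiv (PySem.List.len arr) 2
      let left_required_matches := requiredmatchesFuel fuel (PySem.List.slice arr none (some half))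
      let right_required_matches := requiredmatchesFuel fuel (PySem.List.slice arr (some half) none)
      let matches1 : PySem.Set Int := PySem.Set.ofList (PySem.List.slice arr none (some half))
      let matches2 : PySem.Set Int := PySem.Set.ofList (PySem.List.slice arr (some half) none)
      if PySem.Set.inter matches1 matches2 ≠ [] then
        left_required_matches + right_required_matches
      else
        left_required_matches + right_required_matches + 1

def requiredmatches (arr : List Int) : Int := requiredmatchesFuel arr.length arr

-- ===== PORT B =====
-- the inner for-loop over i in range(0, len(sets), 2); on an odd-length level Python
-- raises IndexError (outside Pre_), here the lone trailing element is dropped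
def rmPairs : List (PySem.Set Int) → List (PySem.Set Int) × Int
  | [] => ([], 0)
  | [_] => ([], 0)
  | a :: b :: rest =>
    let (ms, c) := rmPairs rest
    (PySem.Set.union a b :: ms, (if PySem.Set.isdisjoint a b then 1 else 0) + c)

-- the while loop; fuel = arr.length bounds the number of levels (log2 n ≤ n)
def rmLevels : Nat → List (PySem.Set Int) → Int → Int
  | 0, _, count => count
  | fuel+1, sets, count =>
    if 1 < sets.length then
      let (merged, d) := rmPairs sets
      rmLevels fuel merged (count + d)
    else count

def requiredmatches_alt (arr : List Int) : Int :=
  rmLevels arr.length (arr.map (fun x => PySem.Set.ofList [x])) 0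

-- ===== PRECONDITION & SPEC =====
-- Pre_: A's recursion only bottoms out when every half again halves to length 2,
-- i.e. the length is a power of two ≥ 2; on any other length Python A raises RecursionError.
def Pre_requiredmatches (arr : List Int) : Prop :=
  2 ≤ arr.length ∧ arr.length = 2 ^ Nat.log2 arr.length
instance (arr : List Int) : Decidable (Pre_requiredmatches arr) := by
  unfold Pre_requiredmatches; infer_instance

def pvWitness_requiredmatches : List Int := [0, 1]

def Spec_requiredmatches (arr : List Int) (out : Int) : Prop := out = requiredmatches_alt arr
instance (arr : List Int) (out : Int) : Decidable (Spec_requiredmatches arr out) := by unfold Spec_requiredmatches; infer_instance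

-- ===== CLAIM (what is proved, stated in full; the proofs are below) =====
def Claim_equal_requiredmatches : Prop := ∀ (arr : List Int), Dom_requiredmatches arr → Pre_requiredmatches arr → Spec_requiredmatches arr (requiredmatches arr)

-- ===== LEMMAS AND PROOFS =====

-- proof-side tree spec: the (value-set, count) pair of A's recursion at each node
def tGo : Nat → List Int → PySem.Set Int × Int
  | 0, a => (PySem.Set.ofList a, 0)
  | fuel+1, a =>
    if a.length = 2 then
      (PySem.Set.ofList a, if PySem.List.pyGetD a 0 0 ≠ PySem.List.pyGetD a 1 0 then 1 else 0)
    else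
      let half := a.length / 2
      let l := tGo fuel (a.take half)
      let r := tGo fuel (a.drop half)
      (PySem.Set.union l.1 r.1,
       l.2 + r.2 + (if PySem.Set.isdisjoint l.1 r.1 then 1 else 0))

-- proof-side: one merge level on (set, count) pairs, and its iteration
def mergeLevel : List (PySem.Set Int × Int) → List (PySem.Set Int × Int)
  | [] => []
  | [_] => []
  | p :: q :: rest =>
    (PySem.Set.union p.1 q.1,
     p.2 + q.2 + (if PySem.Set.isdisjoint p.1 q.1 then 1 else 0)) :: mergeLevel rest

def collapse : Nat → List (PySem.Set Int × Int) → List (PySem.Set Int × Int)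
  | 0, L => L
  | m+1, L => collapse m (mergeLevel L)

def totcnt (L : List (PySem.Set Int × Int)) : Int := (L.map Prod.snd).sum

def singleSC (x : Int) : PySem.Set Int × Int := (PySem.Set.ofList [x], 0)

-- the set carried up by tGo has exactly the members of the sublist
theorem tGo_fst_mem (fuel : Nat) (a : List Int) (x : Int) :
    x ∈ (tGo fuel a).1 ↔ x ∈ a := by
  induction fuel generalizing a with
  | zero => simp [tGo, PySem.Set.mem_ofList]
  | succ f ih =>
    simp only [tGo]
    split
    · simp [PySem.Set.mem_ofList]
    · simp only [PySem.Set.mem_union, ih]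
      rw [← List.mem_append, List.take_append_drop]

-- A's slice arguments are take/drop
theorem slice_left (a : List Int) :
    PySem.List.slice a none (some (PySem.Int.floordiv (PySem.List.len a) 2)) = a.take (a.length / 2) := by
  rw [PySem.List.len_eq]
  rw [show PySem.Int.floordiv ((a.length : Int)) 2 = ((a.length / 2 : Nat) : Int) from by
    exact_mod_cast PySem.Int.floordiv_natCast a.length 2]
  exact PySem.List.slice_to_natCast a _

theorem slice_right (a : List Int) :
    PySem.List.slice a (some (PySem.Int.floordiv (PySem.List.len a) 2)) none = a.drop (a.length / 2) := by
  rw [PySem.List.len_eq]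
  rw [show PySem.Int.floordiv ((a.length : Int)) 2 = ((a.length / 2 : Nat) : Int) from by
    exact_mod_cast PySem.Int.floordiv_natCast a.length 2]
  exact PySem.List.slice_from_natCast a _

-- A-side invariant: at equal fuel A's port computes the count of the tree spec
theorem fuel_eq (fuel : Nat) (a : List Int) :
    requiredmatchesFuel fuel a = (tGo fuel a).2 := by
  induction fuel generalizing a with
  | zero => simp [requiredmatchesFuel, tGo]
  | succ f ih =>
    simp only [requiredmatchesFuel, tGo]
    split
    · rfl
    · simp only [slice_left, slice_right, ih]
      have hcond : (PySem.Set.inter (PySem.Set.ofList (a.take (a.length / 2)))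
            (PySem.Set.ofList (a.drop (a.length / 2))) ≠ []) ↔
          ¬ PySem.Set.isdisjoint (tGo f (a.take (a.length / 2))).1
            (tGo f (a.drop (a.length / 2))).1 = true := by
        rw [PySem.Set.isdisjoint_iff]
        constructor
        · intro hne hdisj
          rcases List.exists_mem_of_ne_nil _ hne with ⟨x, hx⟩
          rw [PySem.Set.mem_inter] at hx
          exact hdisj x (by rw [tGo_fst_mem, ← PySem.Set.mem_ofList]; exact hx.1)
            (by rw [tGo_fst_mem, ← PySem.Set.mem_ofList]; exact hx.2)
        · intro h hnil
          apply h
          intro x hxl hxr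
          have : x ∈ PySem.Set.inter (PySem.Set.ofList (a.take (a.length / 2)))
              (PySem.Set.ofList (a.drop (a.length / 2))) := by
            rw [PySem.Set.mem_inter]
            exact ⟨by rw [PySem.Set.mem_ofList, ← tGo_fst_mem f]; exact hxl,
                   by rw [PySem.Set.mem_ofList, ← tGo_fst_mem f]; exact hxr⟩
          simp [hnil] at this
      by_cases hc : PySem.Set.isdisjoint (tGo f (a.take (a.length / 2))).1
          (tGo f (a.drop (a.length / 2))).1 = true
      · rw [if_neg (fun h => hcond.mp h hc), if_pos hc]
      · rw [if_pos (hcond.mpr hc), if_neg hc]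
        ring

-- B's inner loop = one mergeLevel on pairs (fst), counting the level's new disjoint merges (snd)
theorem rmPairs_fst (L : List (PySem.Set Int × Int)) :
    (rmPairs (L.map Prod.fst)).1 = (mergeLevel L).map Prod.fst := by
  induction L using mergeLevel.induct with
  | case1 => simp [rmPairs, mergeLevel]
  | case2 => simp [rmPairs, mergeLevel]
  | case3 p q rest ih => simp [rmPairs, mergeLevel, ih]

theorem rmPairs_snd (L : List (PySem.Set Int × Int)) (he : 2 ∣ L.length) :
    (rmPairs (L.map Prod.fst)).2 = totcnt (mergeLevel L) - totcnt L := by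
  induction L using mergeLevel.induct with
  | case1 => simp [rmPairs, mergeLevel, totcnt]
  | case2 => simp at he
  | case3 p q rest ih =>
    have : 2 ∣ rest.length := by simpa [List.length_cons, Nat.succ_sub_one] using
      (by omega : 2 ∣ rest.length + 1 + 1 → 2 ∣ rest.length) (by simpa using he)
    simp only [List.map_cons, rmPairs, mergeLevel, totcnt, List.map_cons, List.sum_cons] at *
    rw [ih this]
    ring

theorem length_mergeLevel (L : List (PySem.Set Int × Int)) :
    (mergeLevel L).length = L.length / 2 := by
  induction L using mergeLevel.induct with
  | case1 => simp [mergeLevel]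
  | case2 => simp [mergeLevel]
  | case3 p q rest ih => simp [mergeLevel, ih]; omega

theorem mergeLevel_append (L1 L2 : List (PySem.Set Int × Int)) (he : 2 ∣ L1.length) :
    mergeLevel (L1 ++ L2) = mergeLevel L1 ++ mergeLevel L2 := by
  induction L1 using mergeLevel.induct with
  | case1 => simp [mergeLevel]
  | case2 => simp at he
  | case3 p q rest ih =>
    have : 2 ∣ rest.length := by simp at he; omega
    simp [mergeLevel, ih this]

theorem collapse_append (m : Nat) (L1 L2 : List (PySem.Set Int × Int))
    (h1 : L1.length = 2 ^ m) :
    collapse m (L1 ++ L2) = collapse m L1 ++ collapse m L2 := by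
  induction m generalizing L1 L2 with
  | zero => simp [collapse]
  | succ k ih =>
    have hev : 2 ∣ L1.length := ⟨2 ^ k, by rw [h1]; ring⟩
    simp only [collapse, mergeLevel_append _ _ hev]
    exact ih _ _ (by rw [length_mergeLevel, h1, pow_succ]; omega)

theorem collapse_succ' (m : Nat) (L : List (PySem.Set Int × Int)) :
    collapse (m+1) L = mergeLevel (collapse m L) := by
  induction m generalizing L with
  | zero => simp [collapse]
  | succ k ih => simp only [collapse] at *; rw [ih]

-- B's while loop computes the total count accumulated over the levels
theorem rmLevels_eq (m : Nat) : ∀ (fuel : Nat) (L : List (PySem.Set Int × Int)) (c : Int),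
    L.length = 2 ^ m → m ≤ fuel →
    rmLevels fuel (L.map Prod.fst) c = c + totcnt (collapse m L) - totcnt L := by
  induction m with
  | zero =>
    intro fuel L c hL _
    have h1 : (L.map Prod.fst).length = 1 := by simpa using hL
    cases fuel with
    | zero => simp [rmLevels, collapse]
    | succ f => rw [rmLevels, if_neg (by omega)]; simp [collapse]
  | succ k ih =>
    intro fuel L c hL hf
    cases fuel with
    | zero => omega
    | succ f =>
      have hlen : 1 < (L.map Prod.fst).length := by
        rw [List.length_map, hL]; exact Nat.one_lt_two_pow_iff.mpr (Nat.succ_ne_zero k)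
      rw [rmLevels, if_pos hlen]
      have hev : 2 ∣ L.length := ⟨2 ^ k, by rw [hL]; ring⟩
      simp only [rmPairs_fst, rmPairs_snd L hev]
      rw [ih f (mergeLevel L) _ (by rw [length_mergeLevel, hL, pow_succ]; omega) (by omega)]
      simp only [collapse]
      ring

-- singleton value-sets: leaves carry count 0
theorem totcnt_single (arr : List Int) : totcnt (arr.map singleSC) = 0 := by
  induction arr with
  | nil => simp [totcnt]
  | cons x xs ih => simpa [totcnt, singleSC, List.map_cons] using ih

-- collapsing the singleton level of a power-of-two list yields exactly A's tree node
theorem collapse_tGo (s : Nat) : ∀ (fuel : Nat) (a : List Int),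
    a.length = 2 ^ (s + 1) → a.length ≤ fuel →
    collapse (s + 1) (a.map singleSC) = [tGo fuel a] := by
  induction s with
  | zero =>
    intro fuel a hA hf
    match a, hA with
    | [x, y], _ =>
      cases fuel with
      | zero => omega
      | succ f =>
        simp only [collapse, mergeLevel, List.map_cons, List.map_nil, tGo, singleSC]
        rw [if_pos (show ([x, y] : List Int).length = 2 from rfl)]
        have hu : PySem.Set.union (PySem.Set.ofList [x]) (PySem.Set.ofList [y]) =
            PySem.Set.ofList [x, y] := by
          by_cases h : x = y <;>
            simp [PySem.Set.union, PySem.Set.ofList, PySem.Set.update, PySem.Set.add,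
              PySem.Set.contains, PySem.Set.empty, h]
        have hd : PySem.Set.isdisjoint (PySem.Set.ofList [x]) (PySem.Set.ofList [y]) =
            (decide (x ≠ y)) := by
          by_cases h : x = y
          · rw [h, show decide (y ≠ y) = false by simp, Bool.eq_false_iff]
            intro hdisj
            rw [PySem.Set.isdisjoint_iff] at hdisj
            exact hdisj y (by simp [PySem.Set.mem_ofList]) (by simp [PySem.Set.mem_ofList])
          · simp [PySem.Set.isdisjoint_iff, PySem.Set.mem_ofList, h]
        rw [hu, hd]
        by_cases h : x = y <;>
          simp [h, PySem.List.pyGetD]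
  | succ k ih =>
    intro fuel a hA hf
    cases fuel with
    | zero =>
      rw [Nat.le_zero.mp hf] at hA
      exact absurd hA.symm (Nat.pow_pos (by norm_num : 0 < 2)).ne'
    | succ f =>
      have hpos : 0 < 2 ^ (k + 1) := Nat.pow_pos (by norm_num)
      have hx : a.length = 2 ^ (k + 1) * 2 := by rw [hA, pow_succ]
      have hhalf : a.length / 2 = 2 ^ (k + 1) := by
        rw [hx, Nat.mul_div_cancel _ (by norm_num : 0 < 2)]
      have hne2 : ¬ a.length = 2 := by
        have h4 : (2:Nat) ^ 1 ≤ 2 ^ (k + 1) := Nat.pow_le_pow_right (by norm_num) (by omega)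
        omega
      have htl : (a.take (a.length / 2)).length = 2 ^ (k + 1) := by
        rw [List.length_take, hhalf]; omega
      have hdl : (a.drop (a.length / 2)).length = 2 ^ (k + 1) := by
        rw [List.length_drop, hhalf]; omega
      have hfle : 2 ^ (k + 1) ≤ f := by
        have h2 : 2 ^ (k + 1) * 2 ≤ f + 1 := hx ▸ hf
        omega
      have hsplit : a.map singleSC =
          (a.take (a.length / 2)).map singleSC ++ (a.drop (a.length / 2)).map singleSC := by
        rw [← List.map_append, List.take_append_drop]
      rw [collapse_succ', hsplit,
        collapse_append (k + 1) _ _ (by rw [List.length_map]; exact htl),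
        ih f _ htl (by rw [htl]; exact hfle), ih f _ hdl (by rw [hdl]; exact hfle)]
      simp only [tGo, mergeLevel, List.cons_append, List.nil_append]
      rw [if_neg hne2]

-- ===== VERDICT (by name: the statement is the Claim_ definition above) =====
theorem requiredmatches_spec : Claim_equal_requiredmatches := by
  intro arr _ hpre
  obtain ⟨h2, hpow⟩ := hpre
  unfold Spec_requiredmatches requiredmatches requiredmatches_alt
  have hm : 1 ≤ Nat.log2 arr.length := by
    by_contra h
    have : Nat.log2 arr.length = 0 := by omega
    rw [this] at hpow; simp at hpow; omega
  obtain ⟨s, hs⟩ : ∃ s, Nat.log2 arr.length = s + 1 := ⟨Nat.log2 arr.length - 1, by omega⟩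
  have hA : arr.length = 2 ^ (s + 1) := by rw [hpow, hs]
  have hmap : arr.map (fun x => PySem.Set.ofList [x]) = (arr.map singleSC).map Prod.fst := by
    simp [singleSC, List.map_map, Function.comp]
  rw [hmap, rmLevels_eq (s + 1) arr.length (arr.map singleSC) 0
    (by rw [List.length_map]; exact hA)
    (by rw [hA]; exact le_of_lt (Nat.lt_two_pow_self))]
  rw [collapse_tGo s arr.length arr hA (le_refl _), totcnt_single]
  simp [totcnt, fuel_eq]
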